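-- pv_equiv track=rewrite | github.com/Eshunfelix/linuxproject_felix | linuxproject.py | encode_text
-- ===== SOURCE A (Python) =====
-- def format_output(output_text):
--     result_text = ''
--     line_text = ''
--     count_text = 0
--     for letter in output_text:
--         line_text += letter
--         count_text += 1
--         if count_text == 5:
--             result_text += line_text + ' '
--             line_text = ''
--             count_text = 0
--     if line_text:
--         result_text += line_text + '\n'
--     return result_text
--
-- def encode_text(plain_text, shift_value):
--     letters = [char.upper() for char in plain_text if char.isalpha()]
--     encoded = []
--     for char in letters:
--         ascii_val = ord(char)
--         new_val = ascii_val + shift_value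
--         if new_val > ord('Z'):
--             final_val = (new_val - ord('Z')) % 26
--             if final_val == 0:
--                 final_val = 26
--             new_val = final_val + ord('A') - 1
--         encoded.append(chr(new_val))
--     return format_output(''.join(encoded))
-- ===== SOURCE B (Python) =====
-- def encode_text(plain_text, shift_value):
--     letters = [char.upper() for char in plain_text if char.isalpha()]
--     table = {}
--     for c in dict.fromkeys(letters):
--         v = ord(c) + shift_value
--         if v > ord('Z'):
--             r = (v - ord('Z')) % 26
--             v = (26 if r == 0 else r) + ord('A') - 1
--         table[c] = chr(v)
--     encoded = ''.join(table[c] for c in letters)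
--     parts = []
--     i = 0
--     while i < len(encoded):
--         chunk = encoded[i:i + 5]
--         parts.append(chunk + (' ' if len(chunk) == 5 else '\n'))
--         i += 5
--     return ''.join(parts)
-- ===== Notes on version B (the rewrite author's own statement) =====
-- stated objective: alternative
-- what changed: B precomputes the Caesar shift once as a dict over the distinct filtered letters and encodes by table lookup, and replaces the counter-accumulator grouping with an index-stepping while loop that slices encoded[i:i+5] chunks; A shifts every character arithmetically inside the loop and groups with running line/count accumulators.
import Mathlib
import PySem

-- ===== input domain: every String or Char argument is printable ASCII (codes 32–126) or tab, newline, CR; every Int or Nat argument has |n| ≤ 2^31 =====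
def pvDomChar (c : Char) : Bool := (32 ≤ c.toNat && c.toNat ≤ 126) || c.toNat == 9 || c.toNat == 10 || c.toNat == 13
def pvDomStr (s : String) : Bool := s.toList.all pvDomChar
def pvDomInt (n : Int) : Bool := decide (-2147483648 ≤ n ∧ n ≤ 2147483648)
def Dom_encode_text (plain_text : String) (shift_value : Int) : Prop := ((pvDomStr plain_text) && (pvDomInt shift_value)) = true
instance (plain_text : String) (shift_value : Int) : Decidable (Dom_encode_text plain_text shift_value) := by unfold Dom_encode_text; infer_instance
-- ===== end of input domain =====

-- B replaces A's per-character shift arithmetic + counter-accumulator grouping by a precomputed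
-- shift table (dict over the distinct letters) + an index-stepping while loop slicing encoded[i:i+5] chunks;
-- same return value on all inputs where A returns (Pre_ excludes A's chr(<0) ValueError).

-- ===== PORT A =====
-- char.isalpha() / char.upper(), exact on Dom's ASCII characters (shared by both ports:
-- the filter-and-uppercase comprehension is the identical first line of both Pythons)
def pvIsAlpha (c : Char) : Bool := ('A' ≤ c && c ≤ 'Z') || ('a' ≤ c && c ≤ 'z')
def pvUpper (c : Char) : Char := if 'a' ≤ c && c ≤ 'z' then Char.ofNat (c.toNat - 32) else c

-- body of A's encoding loop for one (uppercase) character; chr is exact under Pre_ (code point ≥ 0)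
def pvShiftA (shift_value : Int) (c : Char) : Char :=
  let ascii_val : Int := c.toNat
  let new_val := ascii_val + shift_value
  if new_val > 90 then
    let final_val := PySem.Int.mod (new_val - 90) 26
    let final_val := if final_val = 0 then 26 else final_val
    Char.ofNat (final_val + 65 - 1).toNat
  else
    Char.ofNat new_val.toNat

-- one iteration of format_output's loop: state (result_text, line_text, count_text)
def pvFmtStep (st : List Char × List Char × Int) (letter : Char) : List Char × List Char × Int :=
  let line := st.2.1 ++ [letter]
  let count := st.2.2 + 1
  if count = 5 then (st.1 ++ line ++ [' '], [], 0) else (st.1, line, count)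

def format_output (output_text : String) : String :=
  let st := output_text.toList.foldl pvFmtStep ([], [], 0)
  String.ofList (if st.2.1 ≠ [] then st.1 ++ st.2.1 ++ ['\n'] else st.1)

def encode_text (plain_text : String) (shift_value : Int) : String :=
  let letters := plain_text.toList.foldl
    (fun acc char => if pvIsAlpha char then acc ++ [pvUpper char] else acc) []
  let encoded := letters.foldl (fun acc char => acc ++ [pvShiftA shift_value char]) []
  format_output (String.ofList encoded)

-- ===== PORT B =====
-- the table value B stores for letter c (same arithmetic as the Python); chr exact under Pre_
def pvTableVal (shift_value : Int) (c : Char) : Char :=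
  let v := (c.toNat : Int) + shift_value
  if v > 90 then
    let r := PySem.Int.mod (v - 90) 26
    Char.ofNat ((if r = 0 then 26 else r) + 65 - 1).toNat
  else
    Char.ofNat v.toNat

-- B's while loop over the chunk start index i (0, 5, 10, …); the appended parts are joined,
-- i.e. concatenated, as the recursion returns
def pvChunkLoop (s : List Char) (i : Int) : List Char :=
  if _h : i < PySem.List.len s then
    let chunk := PySem.List.slice s (some i) (some (i + 5))
    (chunk ++ (if chunk.length = 5 then [' '] else ['\n'])) ++ pvChunkLoop s (i + 5)
  else []
termination_by (PySem.List.len s - i).toNat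
decreasing_by
  simp only [PySem.List.len_eq] at *
  omega

def encode_text_alt (plain_text : String) (shift_value : Int) : String :=
  let letters := (plain_text.toList.filter pvIsAlpha).map pvUpper
  let table := (PySem.List.dedup letters).foldl
    (fun d c => d.insert c (pvTableVal shift_value c)) PySem.Dict.empty
  let encoded := letters.map (fun c => (table.get? c).getD c)  -- table[c]; c is always a key
  String.ofList (pvChunkLoop encoded 0)

-- ===== PRECONDITION & SPEC =====
-- Pre_ excludes exactly the inputs on which A raises ValueError (chr of a negative code point:
-- some letter of the text plus a shift below -65); B's Python raises there too.
-- a character is safe iff it is not a letter, or its uppercase code plus the shift is nonnegative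
def pvSafeChar (shift_value : Int) (c : Char) : Bool :=
  (!('A' ≤ c && c ≤ 'Z') || decide (0 ≤ (c.toNat : Int) + shift_value)) &&
  (!('a' ≤ c && c ≤ 'z') || decide (0 ≤ (c.toNat : Int) - 32 + shift_value))

def Pre_encode_text (plain_text : String) (shift_value : Int) : Prop :=
  plain_text.toList.all (pvSafeChar shift_value) = true
instance (plain_text : String) (shift_value : Int) : Decidable (Pre_encode_text plain_text shift_value) := by
  unfold Pre_encode_text; infer_instance

def pvWitness_encode_text : String × Int := ("Ab", 3)

def Spec_encode_text (plain_text : String) (shift_value : Int) (out : String) : Prop := out = encode_text_alt plain_text shift_value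
instance (plain_text : String) (shift_value : Int) (out : String) : Decidable (Spec_encode_text plain_text shift_value out) := by unfold Spec_encode_text; infer_instance

-- ===== CLAIM (what is proved, stated in full; the proofs are below) =====
def Claim_equal_encode_text : Prop := ∀ (plain_text : String) (shift_value : Int), Dom_encode_text plain_text shift_value → Pre_encode_text plain_text shift_value → Spec_encode_text plain_text shift_value (encode_text plain_text shift_value)

-- ===== LEMMAS AND PROOFS =====

-- proof-only reformulation of B's chunk loop: chunks of the remaining suffix
def pvChunks (s : List Char) : List Char :=
  if h : s = [] then []
  else
    let chunk := s.take 5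
    (chunk ++ (if chunk.length = 5 then [' '] else ['\n'])) ++ pvChunks (s.drop 5)
termination_by s.length
decreasing_by
  simp only [List.length_drop]
  cases s with
  | nil => exact absurd rfl h
  | cons a t => simp

-- B's index loop computes the chunks of the suffix from i
theorem chunkLoop_eq (s : List Char) (i : Int) (hi : 0 ≤ i) :
    pvChunkLoop s i = pvChunks (s.drop i.toNat) := by
  rw [pvChunkLoop, pvChunks]
  by_cases h : i < PySem.List.len s
  · simp only [h, dif_pos]
    have hne : s.drop i.toNat ≠ [] := by
      simp only [PySem.List.len_eq] at h
      intro hnil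
      have := congrArg List.length hnil
      simp only [List.length_drop, List.length_nil] at this
      omega
    simp only [hne, reduceDIte]
    rw [PySem.List.slice_toNat s hi (by omega)]
    have h5 : (i + 5).toNat - i.toNat = 5 := by omega
    rw [h5]
    rw [chunkLoop_eq s (i + 5) (by omega)]
    have hd : s.drop (i + 5).toNat = (s.drop i.toNat).drop 5 := by
      rw [List.drop_drop]; congr 1; omega
    rw [hd]
  · simp only [h, dif_neg, not_false_iff]
    have : s.drop i.toNat = [] := by
      simp only [PySem.List.len_eq] at h
      apply List.drop_eq_nil_of_le
      omega
    simp [this]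
termination_by (PySem.List.len s - i).toNat
decreasing_by
  simp only [PySem.List.len_eq] at *
  omega

-- A's shift arithmetic and B's table value coincide
theorem pvShiftA_eq_tableVal (s : Int) (c : Char) : pvShiftA s c = pvTableVal s c := rfl

-- keys not touched by the fold keep their lookup
theorem get?_foldl_insert_of_not_mem (f : Char → Char) (L : List Char)
    (d : PySem.Dict Char Char) (c : Char) (hc : c ∉ L) :
    (L.foldl (fun d c => d.insert c (f c)) d).get? c = d.get? c := by
  induction L generalizing d with
  | nil => rfl
  | cons a t ih =>
      simp only [List.mem_cons, not_or] at hc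
      simp only [List.foldl]
      rw [ih (d.insert a (f a)) hc.2, PySem.Dict.get?_insert_of_ne d (f a) hc.1]

-- looking up a key of the fold-built table returns its stored value
theorem get?_table (f : Char → Char) (L : List Char)
    (d : PySem.Dict Char Char) (c : Char) (hL : L.Nodup) (hc : c ∈ L) :
    (L.foldl (fun d c => d.insert c (f c)) d).get? c = some (f c) := by
  induction L generalizing d with
  | nil => cases hc
  | cons a t ih =>
      simp only [List.foldl]
      rcases List.mem_cons.mp hc with h | h
      · subst h
        rw [get?_foldl_insert_of_not_mem f t _ c (List.nodup_cons.mp hL).1,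
          PySem.Dict.get?_insert_self]
      · exact ih (d.insert a (f a)) (List.nodup_cons.mp hL).2 h

-- grouping: A's accumulator fold equals B's chunk recursion
theorem group_eq (s : List Char) (r : List Char) :
    (let st := s.foldl pvFmtStep (r, [], 0);
     if st.2.1 ≠ [] then st.1 ++ st.2.1 ++ ['\n'] else st.1) = r ++ pvChunks s := by
  match s with
  | [] => rw [pvChunks]; simp
  | [a] => rw [pvChunks]; norm_num [pvFmtStep]; rw [pvChunks]; norm_num
  | [a, b] => rw [pvChunks]; norm_num [pvFmtStep]; rw [pvChunks]; norm_num; simp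
  | [a, b, c] => rw [pvChunks]; norm_num [pvFmtStep]; rw [pvChunks]; norm_num; simp
  | [a, b, c, d] => rw [pvChunks]; norm_num [pvFmtStep]; rw [pvChunks]; norm_num; simp
  | a :: b :: c :: d :: e :: rest =>
      have h1 : (a :: b :: c :: d :: e :: rest).foldl pvFmtStep (r, [], 0)
          = rest.foldl pvFmtStep (r ++ [a, b, c, d, e] ++ [' '], [], 0) := by
        norm_num [List.foldl, pvFmtStep]
      have h2 : pvChunks (a :: b :: c :: d :: e :: rest)
          = [a, b, c, d, e] ++ [' '] ++ pvChunks rest := by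
        rw [pvChunks]; norm_num; simp
      have ih := group_eq rest (r ++ [a, b, c, d, e] ++ [' '])
      simp only [h1, h2]
      simp only [ih]
      simp [List.append_assoc]
termination_by s.length

-- ===== VERDICT (by name: the statement is the Claim_ definition above) =====
theorem encode_text_spec : Claim_equal_encode_text := by
  unfold Claim_equal_encode_text
  intro plain_text shift_value _ _
  simp only [Spec_encode_text, encode_text, encode_text_alt, format_output,
    PySem.List.foldl_append_if, PySem.List.foldl_append_singleton_eq_map,
    List.nil_append, String.toList_ofList]
  rw [group_eq _ [], chunkLoop_eq _ 0 le_rfl]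
  simp only [Int.toNat_zero, List.drop_zero, List.nil_append]
  refine congrArg String.ofList (congrArg pvChunks (List.map_congr_left ?_))
  intro c hc
  rw [get?_table (pvTableVal shift_value) _ _ c (PySem.List.nodup_dedup _)
    ((PySem.List.mem_dedup _ c).mpr hc)]
  simp [pvShiftA_eq_tableVal]
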